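-- pv_equiv track=rewrite | github.com/HerrMaroni/fastapi-recommendation-api- | utils.py | get_base_color
-- ===== SOURCE A (Python) =====
-- def get_base_color(color):
--     ind = 0
--     x = []
--     color = str(color).lower()
--     list_of_cols = ['stone', 'khaki', 'black', 'white', 'blue', 'grey', 'brown', 'red', 'orange', 'yellow', 'green',
--                     'purple', 'pink', 'silver', 'gold', 'navy']
--
--     for el in list_of_cols:
--         if el in str(color).lower():
--             ind += 1
--             x.append(el)
--
--     if ind == 2:
--         if all(b in x for b in ['yellow', 'orange']):
--             return 'yellow-orange'
--         elif all(b in x for b in ['red', 'orange']):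
--             return 'red-orange'
--         elif all(b in x for b in ['red', 'violet']):
--             return 'red-violet'
--         elif all(b in x for b in ['blue', 'violet']):
--             return 'blue-violet'
--         elif all(b in x for b in ['blue', 'green']):
--             return 'blue-green'
--         elif all(b in x for b in ['yellow', 'green']):
--             return 'yellow-green'
--     if ind == 1:
--         if color == 'navy':
--             return 'blue'
--         else:
--             return x[0]
--     else:
--         return 'Multicolor'
-- ===== SOURCE B (Python) =====
-- _BY_FIRST = {
--     's': ('stone', 'silver'),
--     'k': ('khaki',),
--     'b': ('black', 'blue', 'brown'),
--     'w': ('white',),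
--     'g': ('grey', 'green', 'gold'),
--     'r': ('red',),
--     'o': ('orange',),
--     'y': ('yellow',),
--     'p': ('purple', 'pink'),
--     'n': ('navy',),
-- }
--
-- _COMPOUNDS = (('orange', ('yellow', 'red')), ('green', ('blue', 'yellow')))
--
--
-- def get_base_color(color):
--     c = str(color).lower()
--     found = set()
--     # single left-to-right scan of the string: at each position try only the
--     # colour names that start with the character seen there
--     for i, ch in enumerate(c):
--         for name in _BY_FIRST.get(ch, ()):
--             if c.startswith(name, i):
--                 found.add(name)
--     if len(found) == 1:
--         (only,) = found
--         return 'blue' if c == 'navy' else only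
--     if len(found) == 2:
--         for primary, secondaries in _COMPOUNDS:
--             if primary in found:
--                 (rest,) = found - {primary}
--                 if rest in secondaries:
--                     return rest + '-' + primary
--     return 'Multicolor'
-- ===== Notes on version B (the rewrite author's own statement) =====
-- stated objective: alternative
-- what changed: A runs a substring search over the whole string for each of the 16 colour names and then walks an if/elif cascade of pairwise membership tests; B makes a single left-to-right scan of the string, trying at each position only the names that begin with the character found there (a first-letter index), collects the matches in a set, and names two-colour compounds by a primary->secondaries rule table (orange/green with their mixable partners) instead of the branch cascade.
import Mathlib
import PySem

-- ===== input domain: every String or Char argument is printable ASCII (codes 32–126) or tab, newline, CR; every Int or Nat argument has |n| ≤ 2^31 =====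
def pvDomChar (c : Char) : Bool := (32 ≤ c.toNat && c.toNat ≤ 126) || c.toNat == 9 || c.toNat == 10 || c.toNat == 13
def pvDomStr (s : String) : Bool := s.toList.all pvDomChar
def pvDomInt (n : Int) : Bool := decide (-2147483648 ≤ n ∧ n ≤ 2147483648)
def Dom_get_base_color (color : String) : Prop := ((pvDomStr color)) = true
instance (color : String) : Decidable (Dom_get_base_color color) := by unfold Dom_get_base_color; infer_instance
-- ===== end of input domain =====

-- B replaces A's per-name substring search and branch cascade by a single left-to-right scan
-- of the string (per position, only names starting with the character there are tried,
-- via a first-letter index) and a rule table primary+secondary for the compound names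
-- (objective: alternative).

-- ===== PORT A =====
def pvColsA : List String :=
  ["stone", "khaki", "black", "white", "blue", "grey", "brown", "red", "orange", "yellow", "green",
   "purple", "pink", "silver", "gold", "navy"]

-- transliteration of A: a fold accumulating (ind, x), then the if/elif cascade;
-- x[0] is read with pyGet?/getD (only reached when ind == 1, so x is nonempty there)
def get_base_color (color : String) : String :=
  let c := PySem.Str.lower color
  let st := pvColsA.foldl
    (fun (acc : Int × List String) el =>
      if PySem.Str.isIn el (PySem.Str.lower c) then (acc.1 + 1, acc.2 ++ [el]) else acc)
    ((0 : Int), ([] : List String))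
  let ind := st.1
  let x := st.2
  if ind = 2 then
    if (["yellow", "orange"] : List String).all (fun b => x.contains b) then "yellow-orange"
    else if (["red", "orange"] : List String).all (fun b => x.contains b) then "red-orange"
    else if (["red", "violet"] : List String).all (fun b => x.contains b) then "red-violet"
    else if (["blue", "violet"] : List String).all (fun b => x.contains b) then "blue-violet"
    else if (["blue", "green"] : List String).all (fun b => x.contains b) then "blue-green"
    else if (["yellow", "green"] : List String).all (fun b => x.contains b) then "yellow-green"
    else if ind = 1 then (if c = "navy" then "blue" else (PySem.List.pyGet? x 0).getD "")
    else "Multicolor"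
  else if ind = 1 then (if c = "navy" then "blue" else (PySem.List.pyGet? x 0).getD "")
  else "Multicolor"

-- ===== PORT B =====
-- first-letter index over the colour names (the _BY_FIRST dict literal of Source B)
def pvByFirst : PySem.Dict Char (List String) :=
  PySem.Dict.ofList
    [('s', ["stone", "silver"]), ('k', ["khaki"]), ('b', ["black", "blue", "brown"]),
     ('w', ["white"]), ('g', ["grey", "green", "gold"]), ('r', ["red"]), ('o', ["orange"]),
     ('y', ["yellow"]), ('p', ["purple", "pink"]), ('n', ["navy"])]

-- primary colour -> secondaries it forms a compound name with (the _COMPOUNDS tuple of Source B)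
def pvCompounds : List (String × List String) :=
  [("orange", ["yellow", "red"]), ("green", ["blue", "yellow"])]

-- the 'for primary, secondaries in _COMPOUNDS' loop with its early return, as an Option fold;
-- rest + '-' + primary is string concatenation, done exactly on the character lists
def pvCompoundScan (found : PySem.Set String) : Option String :=
  pvCompounds.foldl
    (fun acc pr =>
      match acc with
      | some r => some r
      | none =>
        if PySem.Set.contains found pr.1 then
          match PySem.Set.diff found [pr.1] with
          | [rest] =>
              if pr.2.contains rest then
                some (String.ofList (rest.toList ++ '-' :: pr.1.toList))
              else none
          | _ => none
        else none)
    none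

-- the scanning loop: for i, ch in enumerate(c): for name in _BY_FIRST.get(ch, ()): …
-- c.startswith(name, i) is exact as a prefix test on the characters from position i (0 ≤ i)
def pvScan (cs : List Char) : PySem.Set String :=
  (PySem.List.enumerate cs).foldl
    (fun s p =>
      (PySem.Dict.getD pvByFirst p.2 []).foldl
        (fun s name =>
          if PySem.Chars.startswith (cs.drop p.1.toNat) name.toList then PySem.Set.add s name
          else s)
        s)
    PySem.Set.empty

def get_base_color_alt (color : String) : String :=
  let c := PySem.Str.lower color
  let found := pvScan c.toList
  match found with
  | [only] => if c = "navy" then "blue" else only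
  | [_, _] => (pvCompoundScan found).getD "Multicolor"
  | _ => "Multicolor"

-- ===== PRECONDITION & SPEC =====
def Spec_get_base_color (color : String) (out : String) : Prop := out = get_base_color_alt color
instance (color : String) (out : String) : Decidable (Spec_get_base_color color out) := by unfold Spec_get_base_color; infer_instance

-- ===== CLAIM (what is proved, stated in full; the proofs are below) =====
def Claim_equal_get_base_color : Prop := ∀ (color : String), Dom_get_base_color color → Spec_get_base_color color (get_base_color color)

-- ===== LEMMAS AND PROOFS =====

theorem pvLowerChar_idem (c : Char) :
    PySem.Chars.lowerChar (PySem.Chars.lowerChar c) = PySem.Chars.lowerChar c := by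
  simp only [PySem.Chars.lowerChar, PySem.Chars.isupper]
  split_ifs with h1 h2 <;> try rfl
  exfalso
  simp only [Bool.and_eq_true, decide_eq_true_eq, Char.le_def, UInt32.le_iff_toNat_le] at h1 h2
  have hval : Nat.isValidChar (c.toNat + 32) := Or.inl (by
    have := h1.2; change c.toNat ≤ 90 at this; omega)
  have hv : (Char.ofNat (c.toNat + 32)).toNat = c.toNat + 32 := by
    rw [Char.toNat_ofNat, if_pos hval]
  change _ ∧ (Char.ofNat (c.toNat + 32)).toNat ≤ 90 at h2
  have h2' := h2.2
  rw [hv] at h2'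
  have h1' : 65 ≤ c.toNat := h1.1
  omega

theorem pvLower_idem (s : String) :
    PySem.Str.lower (PySem.Str.lower s) = PySem.Str.lower s := by
  have h : (PySem.Str.lower (PySem.Str.lower s)).toList = (PySem.Str.lower s).toList := by
    simp only [PySem.Str.toList_lower, PySem.Chars.lower, List.map_map]
    exact List.map_congr_left (fun c _ => pvLowerChar_idem c)
  exact String.toList_inj.mp h

-- A's counting loop is filter plus length
theorem pvFoldA (l : List String) (p : String → Bool) (n : Int) (acc : List String) :
    l.foldl (fun (a : Int × List String) el =>
        if p el then (a.1 + 1, a.2 ++ [el]) else a) (n, acc)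
      = (n + (l.filter p).length, acc ++ l.filter p) := by
  induction l generalizing n acc with
  | nil => simp
  | cons hd tl ih =>
    by_cases h : p hd <;> simp [h, ih] <;> try ring_nf

-- membership in the inner scanning fold (the 'for name in _BY_FIRST.get(ch, ())' loop)
theorem pvMemFoldAdd (ns : List String) (q : String → Bool) (s : PySem.Set String) (x : String) :
    x ∈ ns.foldl (fun s n => if q n then PySem.Set.add s n else s) s
      ↔ x ∈ s ∨ (x ∈ ns ∧ q x = true) := by
  induction ns generalizing s with
  | nil => simp
  | cons hd tl ih =>
    by_cases h : q hd = true
    · rw [List.foldl_cons, if_pos h, ih, PySem.Set.mem_add]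
      constructor
      · rintro ((hs | rfl) | ⟨ht, hq⟩)
        · exact .inl hs
        · exact .inr ⟨.head _, h⟩
        · exact .inr ⟨.tail _ ht, hq⟩
      · rintro (hs | ⟨hm, hq⟩)
        · exact .inl (.inl hs)
        · rcases List.mem_cons.mp hm with rfl | ht
          · exact .inl (.inr rfl)
          · exact .inr ⟨ht, hq⟩
    · rw [List.foldl_cons, if_neg h, ih]
      constructor
      · rintro (hs | ⟨ht, hq⟩)
        · exact .inl hs
        · exact .inr ⟨.tail _ ht, hq⟩
      · rintro (hs | ⟨hm, hq⟩)
        · exact .inl hs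
        · rcases List.mem_cons.mp hm with rfl | ht
          · exact absurd hq h
          · exact .inr ⟨ht, hq⟩

theorem pvNodupFoldAdd (ns : List String) (q : String → Bool) (s : PySem.Set String)
    (hs : s.Nodup) :
    (ns.foldl (fun s n => if q n then PySem.Set.add s n else s) s).Nodup := by
  induction ns generalizing s with
  | nil => exact hs
  | cons hd tl ih =>
    rw [List.foldl_cons]
    by_cases h : q hd = true
    · rw [if_pos h]; exact ih _ (PySem.Set.nodup_add _ _ hs)
    · rw [if_neg h]; exact ih _ hs

-- membership in the outer scanning fold, over an arbitrary list of (index, char) pairs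
theorem pvMemScanAux (cs : List Char) (ps : List (Int × Char)) (s : PySem.Set String)
    (x : String) :
    x ∈ ps.foldl (fun s p =>
          (PySem.Dict.getD pvByFirst p.2 []).foldl
            (fun s name =>
              if PySem.Chars.startswith (cs.drop p.1.toNat) name.toList then PySem.Set.add s name
              else s) s) s
      ↔ x ∈ s ∨ ∃ p ∈ ps, x ∈ PySem.Dict.getD pvByFirst p.2 [] ∧
          PySem.Chars.startswith (cs.drop p.1.toNat) x.toList = true := by
  induction ps generalizing s with
  | nil => simp
  | cons hd tl ih =>
    rw [List.foldl_cons, ih, pvMemFoldAdd, List.exists_mem_cons_iff]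
    tauto

theorem pvNodupScanAux (cs : List Char) (ps : List (Int × Char)) (s : PySem.Set String)
    (hs : s.Nodup) :
    (ps.foldl (fun s p =>
        (PySem.Dict.getD pvByFirst p.2 []).foldl
          (fun s name =>
            if PySem.Chars.startswith (cs.drop p.1.toNat) name.toList then PySem.Set.add s name
            else s) s) s).Nodup := by
  induction ps generalizing s with
  | nil => exact hs
  | cons hd tl ih => rw [List.foldl_cons]; exact ih _ (pvNodupFoldAdd _ _ _ hs)

theorem pvNodupScan (cs : List Char) : (pvScan cs).Nodup :=
  pvNodupScanAux cs _ _ List.nodup_nil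

-- membership in enumerate
theorem pvMemEnum {α : Type} (xs : List α) (k : Int) (p : Int × α) :
    p ∈ PySem.List.enumerate xs k ↔
      ∃ i : Nat, i < xs.length ∧ p.1 = k + i ∧ xs[i]? = some p.2 := by
  induction xs generalizing k with
  | nil => simp [PySem.List.enumerate_nil]
  | cons hd tl ih =>
    rw [PySem.List.enumerate_cons, List.mem_cons, ih]
    constructor
    · rintro (rfl | ⟨i, hi, h1, h2⟩)
      · exact ⟨0, by simp, by simp, by simp⟩
      · exact ⟨i + 1, by simpa using hi, by push_cast [h1]; ring, by simpa using h2⟩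
    · rintro ⟨i, hi, h1, h2⟩
      cases i with
      | zero =>
        left
        simp only [List.getElem?_cons_zero, Option.some.injEq] at h2
        simp only [Nat.cast_zero, add_zero] at h1
        cases p
        simp_all
      | succ j =>
        right
        exact ⟨j, by simpa using hi, by push_cast at h1 ⊢; omega, by simpa using h2⟩

-- the scanning loop finds x exactly when x matches at some position
theorem pvScan_mem (cs : List Char) (x : String) :
    x ∈ pvScan cs ↔
      ∃ i : Nat, i < cs.length ∧ x ∈ PySem.Dict.getD pvByFirst (cs.getD i ' ') [] ∧
        PySem.Chars.startswith (cs.drop i) x.toList = true := by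
  unfold pvScan
  rw [pvMemScanAux]
  constructor
  · rintro (hs | ⟨p, hp, hg, hsw⟩)
    · simp [PySem.Set.empty] at hs
    · obtain ⟨i, hi, h1, h2⟩ := (pvMemEnum cs 0 p).mp hp
      refine ⟨i, hi, ?_, ?_⟩
      · have : cs.getD i ' ' = p.2 := by
          rw [List.getD_eq_getElem?_getD, h2]; rfl
        rwa [this]
      · have : p.1.toNat = i := by omega
        rwa [this] at hsw
  · rintro ⟨i, hi, hg, hsw⟩
    right
    refine ⟨((i : Int), cs.getD i ' '), ?_, hg, by simpa using hsw⟩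
    rw [pvMemEnum]
    exact ⟨i, hi, by simp, by rw [List.getD_eq_getElem?_getD, List.getElem?_eq_getElem hi]; rfl⟩

-- every name in the first-letter index is one of the colours and starts with its key
theorem pvG_sub (ch : Char) (x : String) (hx : x ∈ PySem.Dict.getD pvByFirst ch []) :
    x ∈ pvColsA := by
  have hmk : pvByFirst = PySem.Dict.mk
      [('s', ["stone", "silver"]), ('k', ["khaki"]), ('b', ["black", "blue", "brown"]),
       ('w', ["white"]), ('g', ["grey", "green", "gold"]), ('r', ["red"]), ('o', ["orange"]),
       ('y', ["yellow"]), ('p', ["purple", "pink"]), ('n', ["navy"])] := by decide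
  rw [hmk, PySem.Dict.getD_eq_get?_getD] at hx
  simp only [PySem.Dict.get?_mk_cons] at hx
  split_ifs at hx <;> simp_all [PySem.Dict.get?] <;> rcases hx with rfl | hx <;>
    first | decide | (rcases hx with rfl | hx <;> first | decide | (rcases hx with rfl | hx <;> decide))

-- every colour name is nonempty and listed in the index under its first character
theorem pvG_mem : ∀ n ∈ pvColsA,
    n.toList ≠ [] ∧ n ∈ PySem.Dict.getD pvByFirst (n.toList.headD ' ') [] := by decide

-- found = the set of colours occurring as substrings
theorem pvScan_iff (cs : List Char) (x : String) :
    x ∈ pvScan cs ↔ x ∈ pvColsA ∧ PySem.Chars.isIn x.toList cs = true := by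
  rw [pvScan_mem]
  constructor
  · rintro ⟨i, hi, hg, hsw⟩
    refine ⟨pvG_sub _ _ hg, ?_⟩
    rw [← PySem.Chars.exists_prefix_drop_iff_isIn]
    exact ⟨i, (PySem.Chars.startswith_iff _ _).mp hsw⟩
  · rintro ⟨hx, hin⟩
    obtain ⟨hne, hg⟩ := pvG_mem x hx
    obtain ⟨j, hj⟩ := (PySem.Chars.exists_prefix_drop_iff_isIn x.toList cs).mpr hin
    have hjlt : j < cs.length := by
      by_contra hge
      have : cs.drop j = [] := List.drop_eq_nil_iff.mpr (by omega)
      rw [this, List.prefix_nil] at hj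
      exact hne hj
    obtain ⟨r, hr⟩ := hj
    have hhead : cs.getD j ' ' = x.toList.headD ' ' := by
      cases hxl : x.toList with
      | nil => exact absurd hxl hne
      | cons h t =>
        rw [hxl] at hr
        rw [List.getD_eq_getElem?_getD, ← List.head?_drop, ← hr]
        rfl
    exact ⟨j, hjlt, by rw [hhead]; exact hg,
      (PySem.Chars.startswith_iff _ _).mpr ⟨r, hr⟩⟩

theorem pvColsA_nodup : pvColsA.Nodup := by decide

-- a nodup list permuting a pair is one of the two orders
theorem pvPermPair {α : Type} {l : List α} {a b : α} (h : l.Perm [a, b]) (hnd : l.Nodup) :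
    l = [a, b] ∨ l = [b, a] := by
  have hlen : l.length = 2 := by simpa using h.length_eq
  rcases l with _ | ⟨p, _ | ⟨q, _ | ⟨r, rest⟩⟩⟩
  · simp at hlen
  · simp at hlen
  · have hp : p ∈ [a, b] := h.mem_iff.mp (by simp)
    have hq : q ∈ [a, b] := h.mem_iff.mp (by simp)
    have hpq : p ≠ q := by simp at hnd; exact hnd
    simp only [List.mem_cons, List.not_mem_nil, or_false] at hp hq
    rcases hp with rfl | rfl
    · rcases hq with rfl | rfl
      · exact absurd rfl hpq
      · exact .inl rfl
    · rcases hq with rfl | rfl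
      · exact .inr rfl
      · exact absurd rfl hpq
  · simp at hlen

-- on a two-element matched set, A's if/elif cascade agrees with B's compound-rule scan,
-- whichever order the scan discovered the two colours in
theorem pvPairTable :
    pvColsA.all (fun a => pvColsA.all (fun b =>
      a == b ||
      (((if (["yellow", "orange"] : List String).all (fun t => [a, b].contains t) then "yellow-orange"
        else if (["red", "orange"] : List String).all (fun t => [a, b].contains t) then "red-orange"
        else if (["red", "violet"] : List String).all (fun t => [a, b].contains t) then "red-violet"
        else if (["blue", "violet"] : List String).all (fun t => [a, b].contains t) then "blue-violet"
        else if (["blue", "green"] : List String).all (fun t => [a, b].contains t) then "blue-green"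
        else if (["yellow", "green"] : List String).all (fun t => [a, b].contains t) then "yellow-green"
        else "Multicolor") == (pvCompoundScan [a, b]).getD "Multicolor")
       &&
       ((if (["yellow", "orange"] : List String).all (fun t => [a, b].contains t) then "yellow-orange"
        else if (["red", "orange"] : List String).all (fun t => [a, b].contains t) then "red-orange"
        else if (["red", "violet"] : List String).all (fun t => [a, b].contains t) then "red-violet"
        else if (["blue", "violet"] : List String).all (fun t => [a, b].contains t) then "blue-violet"
        else if (["blue", "green"] : List String).all (fun t => [a, b].contains t) then "blue-green"
        else if (["yellow", "green"] : List String).all (fun t => [a, b].contains t) then "yellow-green"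
        else "Multicolor") == (pvCompoundScan [b, a]).getD "Multicolor")))) = true := by
  decide

-- ===== VERDICT (by name: the statement is the Claim_ definition above) =====
theorem get_base_color_spec : Claim_equal_get_base_color := by
  intro color _
  unfold Spec_get_base_color get_base_color get_base_color_alt
  dsimp only
  set c := PySem.Str.lower color with hc
  have hp : (fun (acc : Int × List String) el =>
        if PySem.Str.isIn el (PySem.Str.lower c) = true then (acc.1 + 1, acc.2 ++ [el]) else acc)
      = (fun (acc : Int × List String) el =>
        if PySem.Str.isIn el c = true then (acc.1 + 1, acc.2 ++ [el]) else acc) := by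
    funext acc el; rw [hc, pvLower_idem]
  rw [hp, pvFoldA pvColsA _ 0 []]
  have hmemF : ∀ x, x ∈ pvScan c.toList ↔ x ∈ pvColsA.filter (fun el => PySem.Str.isIn el c) := by
    intro x
    rw [pvScan_iff, List.mem_filter]
    simp [PySem.Str.isIn_eq]
  have hperm : (pvScan c.toList).Perm (pvColsA.filter (fun el => PySem.Str.isIn el c)) :=
    (List.perm_ext_iff_of_nodup (pvNodupScan _) (pvColsA_nodup.filter _)).mpr hmemF
  match hm : pvColsA.filter (fun el => PySem.Str.isIn el c) with
  | [] =>
      have hfd : pvScan c.toList = [] := List.perm_nil.mp (hm ▸ hperm)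
      rw [hfd]
      simp
  | [a] =>
      have hfd : pvScan c.toList = [a] := List.perm_singleton.mp (hm ▸ hperm)
      rw [hfd]
      simp [PySem.List.pyGet?, PySem.List.pyIdx?]
  | [a, b] =>
      have hperm2 : (pvScan c.toList).Perm [a, b] := hm ▸ hperm
      have hnd2 : a ≠ b := by
        have h := pvColsA_nodup.filter (fun el => PySem.Str.isIn el c)
        rw [hm] at h; simp at h; exact h
      have ha : a ∈ pvColsA := by
        have h : a ∈ pvColsA.filter (fun el => PySem.Str.isIn el c) := by rw [hm]; simp
        exact (List.mem_filter.mp h).1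
      have hb : b ∈ pvColsA := by
        have h : b ∈ pvColsA.filter (fun el => PySem.Str.isIn el c) := by rw [hm]; simp
        exact (List.mem_filter.mp h).1
      have h2 := (List.all_eq_true.mp ((List.all_eq_true.mp pvPairTable) a ha)) b hb
      rcases Bool.or_eq_true_iff.mp h2 with h | h
      · exact absurd (by simpa using h) hnd2
      · obtain ⟨hL, hR⟩ := Bool.and_eq_true_iff.mp h
        have hLeq := eq_of_beq hL
        have hReq := eq_of_beq hR
        have hfd : pvScan c.toList = [a, b] ∨ pvScan c.toList = [b, a] :=
          pvPermPair hperm2 (pvNodupScan _)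
        rcases hfd with hfd | hfd <;> rw [hfd]
        · simpa using hLeq
        · simpa using hReq
  | a :: b :: d :: tl =>
      have hperm3 : (pvScan c.toList).Perm (a :: b :: d :: tl) := hm ▸ hperm
      have hlen : (pvScan c.toList).length = (a :: b :: d :: tl).length := hperm3.length_eq
      match hfd : pvScan c.toList with
      | [] => rw [hfd] at hlen; simp at hlen
      | [_] => rw [hfd] at hlen; simp at hlen
      | [_, _] => rw [hfd] at hlen; simp at hlen
      | p :: q :: r :: rest =>
          simp only [List.length_cons]
          rw [if_neg (by push_cast; omega), if_neg (by push_cast; omega)]
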